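-- pv_equiv track=rewrite | github.com/OLVXX/rzeczy_szkola | python/zad5/zad5.py | zadanie_4
-- ===== SOURCE A (Python) =====
-- def zadanie_4(obraz):
--     def najdluzsza_linia_pionowa(wiersz):
--         aktualna_dlugosc = 1
--         maks_dlugosc = 1
--         for i in range(1, len(wiersz)):
--             if wiersz[i] == wiersz[i-1]:
--                 aktualna_dlugosc += 1
--             else:
--                 maks_dlugosc = max(maks_dlugosc, aktualna_dlugosc)
--                 aktualna_dlugosc = 1
--         return max(maks_dlugosc, aktualna_dlugosc)
--
--     najdluzsza_linia = max(najdluzsza_linia_pionowa([obraz[i][j] for i in range(len(obraz))]) for j in range(len(obraz[0])))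
--     return najdluzsza_linia
-- ===== SOURCE B (Python) =====
-- def zadanie_4(obraz):
--     cur = [1] * len(obraz[0])
--     best = max(cur)
--     for prev, row in zip(obraz, obraz[1:]):
--         new_cur = []
--         for c, p, a in zip(cur, prev, row):
--             c = c + 1 if a == p else 1
--             if c > best:
--                 best = c
--             new_cur.append(c)
--         cur = new_cur
--     return best
-- ===== Notes on version B (the rewrite author's own statement) =====
-- stated objective: faster
-- what changed: A extracts each column as a fresh list (an indexed pass over all rows per column) and scans each column for its longest run; B makes a single row-major pass over the image with zip iteration, keeping one run-length counter per column and a running maximum, so no column lists are built and no per-element indexing is done.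
-- outside the precondition, e.g. on zadanie_4([[1, 2], [1]]): A raises IndexError, B returns 2; on zadanie_4([[]]): A raises ValueError, B raises ValueError; on zadanie_4([]): A raises IndexError, B raises IndexError
import Mathlib
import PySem

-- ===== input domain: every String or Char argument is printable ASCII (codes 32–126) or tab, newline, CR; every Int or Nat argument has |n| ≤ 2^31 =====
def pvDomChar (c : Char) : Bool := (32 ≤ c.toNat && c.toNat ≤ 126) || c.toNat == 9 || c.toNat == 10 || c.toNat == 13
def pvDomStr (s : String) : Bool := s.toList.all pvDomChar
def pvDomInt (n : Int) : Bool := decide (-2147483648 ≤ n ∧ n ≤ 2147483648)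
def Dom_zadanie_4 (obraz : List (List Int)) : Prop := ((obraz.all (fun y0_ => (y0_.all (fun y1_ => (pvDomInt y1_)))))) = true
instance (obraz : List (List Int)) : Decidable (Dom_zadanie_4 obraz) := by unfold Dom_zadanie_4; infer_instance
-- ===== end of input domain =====

-- B replaces A's column-by-column extraction (building each column list, then a per-column
-- run scan) by a single row-major pass keeping one run length per column (measurably faster by a constant factor: no column lists, no per-element indexing).

-- ===== PORT A =====
-- helper `najdluzsza_linia_pionowa`: run scan with lazily updated maximum, loop over range(1, len)
def pvNajA (wiersz : List Int) : Int :=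
  let st := (PySem.List.pyRange 1 wiersz.length 1).foldl
    (fun (st : Int × Int) i =>
      if PySem.List.pyGetD wiersz i 0 = PySem.List.pyGetD wiersz (i - 1) 0 then
        (st.1 + 1, st.2)
      else
        (1, max st.2 st.1)) (1, 1)
  max st.2 st.1

def zadanie_4 (obraz : List (List Int)) : Int :=
  -- max(najdluzsza_linia_pionowa([obraz[i][j] for i in range(len(obraz))]) for j in range(len(obraz[0])))
  let vals := (PySem.List.pyRange 0 (PySem.List.pyGetD obraz 0 ([] : List Int)).length 1).map
    (fun j => pvNajA ((PySem.List.pyRange 0 obraz.length 1).map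
      (fun i => PySem.List.pyGetD (PySem.List.pyGetD obraz i ([] : List Int)) j 0)))
  match vals with
  | [] => 0            -- Python: max() over an empty generator raises ValueError; excluded by Pre_
  | h :: t => t.foldl max h

-- ===== PORT B =====
def zadanie_4_alt (obraz : List (List Int)) : Int :=
  let cur0 : List Int := List.replicate (PySem.List.pyGetD obraz 0 ([] : List Int)).length 1
  let best0 : Int := match cur0 with
    | [] => 0          -- Python: max([]) raises ValueError; excluded by Pre_
    | h :: t => t.foldl max h
  -- for prev, row in zip(obraz, obraz[1:]):   (obraz[1:] = drop 1, exact)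
  let st := (obraz.zip (obraz.drop 1)).foldl
    (fun (st : List Int × Int) pr =>
      -- for c, p, a in zip(cur, prev, row):  (zip3 rendered as nested zip; t = ((c, p), a))
      ((st.1.zip pr.1).zip pr.2).foldl
        (fun (acc : List Int × Int) t =>
          let c : Int := if t.2 = t.1.2 then t.1.1 + 1 else 1
          (acc.1 ++ [c], if c > acc.2 then c else acc.2)) (([] : List Int), st.2))
    (cur0, best0)
  st.2

-- ===== PRECONDITION & SPEC =====
-- Pre_ excludes exactly the inputs on which Python A raises: an empty image (IndexError on
-- obraz[0]), an empty first row (ValueError from max over an empty generator) and ragged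
-- images with some row shorter than the first one (IndexError on obraz[i][j]).
def Pre_zadanie_4 (obraz : List (List Int)) : Prop :=
  obraz ≠ [] ∧ obraz.headI ≠ [] ∧ ∀ r ∈ obraz, obraz.headI.length ≤ r.length
instance (obraz : List (List Int)) : Decidable (Pre_zadanie_4 obraz) := by
  unfold Pre_zadanie_4; infer_instance

def pvWitness_zadanie_4 : List (List Int) := [[1, 2], [1, 3]]

def Spec_zadanie_4 (obraz : List (List Int)) (out : Int) : Prop := out = zadanie_4_alt obraz
instance (obraz : List (List Int)) (out : Int) : Decidable (Spec_zadanie_4 obraz out) := by unfold Spec_zadanie_4; infer_instance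

-- ===== CLAIM (what is proved, stated in full; the proofs are below) =====
def Claim_equal_zadanie_4 : Prop := ∀ (obraz : List (List Int)), Dom_zadanie_4 obraz → Pre_zadanie_4 obraz → Spec_zadanie_4 obraz (zadanie_4 obraz)

-- ===== LEMMAS AND PROOFS =====

-- generic run scan over a column, consuming (previous value, rest of the column)
def pvGoWith (g : Int × Int → Int → Int → Int × Int) : Int → List Int → Int × Int → Int × Int
  | _, [], s => s
  | p, a :: r, s => pvGoWith g a r (g s a p)

-- A's step (lazy max update) and B's step (eager max update), s = (current run, max)
def pvLazyStep (s : Int × Int) (a p : Int) : Int × Int :=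
  if a = p then (s.1 + 1, s.2) else (1, max s.2 s.1)
def pvEagStep (s : Int × Int) (a p : Int) : Int × Int :=
  if a = p then (s.1 + 1, max s.2 (s.1 + 1)) else (1, s.2)

-- B's per-row update of the list of per-column states
def pvRowStep : List (Int × Int) → List Int → List Int → List (Int × Int)
  | s :: st, p :: ps, a :: as_ => pvEagStep s a p :: pvRowStep st ps as_
  | _, _, _ => []

def pvFoldRows (L : List (List Int × List Int)) (st : List (Int × Int)) : List (Int × Int) :=
  L.foldl (fun s pr => pvRowStep s pr.1 pr.2) st

def pvFoldF (l : List (Int × Int)) (b : Int) : Int :=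
  l.foldl (fun x s => max x s.2) b

theorem pvRowStep_length (st : List (Int × Int)) (p r : List Int) :
    (pvRowStep st p r).length = min st.length (min p.length r.length) := by
  induction st generalizing p r with
  | nil => cases p <;> cases r <;> simp [pvRowStep]
  | cons s st ih =>
      cases p with
      | nil => simp [pvRowStep]
      | cons x ps =>
          cases r with
          | nil => simp [pvRowStep]
          | cons a as_ => simp only [pvRowStep, List.length_cons, ih]; omega

theorem pvRowStep_getD (st : List (Int × Int)) (p r : List Int) (k : Nat)
    (h1 : k < st.length) (h2 : k < p.length) (h3 : k < r.length) :
    (pvRowStep st p r).getD k (0, 0) =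
      pvEagStep (st.getD k (0, 0)) (r.getD k 0) (p.getD k 0) := by
  induction st generalizing p r k with
  | nil => simp at h1
  | cons s st ih =>
      cases p with
      | nil => simp at h2
      | cons x ps =>
          cases r with
          | nil => simp at h3
          | cons a as_ =>
              cases k with
              | zero => rfl
              | succ k =>
                  simp only [pvRowStep, List.getD_cons_succ]
                  exact ih ps as_ k (by simpa using h1) (by simpa using h2) (by simpa using h3)

-- ===== A-side: range(1, len) fold = structural scan =====

theorem pvAdjAux (t : List Int) :
    ∀ (pre : List Int) (p : Int) (init : Int × Int),
    (PySem.List.pyRange ((pre.length : Int) + 1) ((pre.length : Int) + 1 + t.length) 1).foldl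
      (fun st i =>
        if PySem.List.pyGetD (pre ++ p :: t) i 0 = PySem.List.pyGetD (pre ++ p :: t) (i - 1) 0 then
          (st.1 + 1, st.2)
        else
          (1, max st.2 st.1)) init
    = pvGoWith pvLazyStep p t init := by
  induction t with
  | nil =>
      intro pre p init
      rw [PySem.List.pyRange_one_eq_nil (by simp)]
      rfl
  | cons a r ih =>
      intro pre p init
      rw [PySem.List.pyRange_one_cons (by push_cast [List.length_cons]; omega)]
      simp only [List.foldl_cons]
      have hgp : PySem.List.pyGetD (pre ++ p :: a :: r) ((pre.length : Int) + 1 - 1) 0 = p := by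
        simp
      have hga : PySem.List.pyGetD (pre ++ p :: a :: r) ((pre.length : Int) + 1) 0 = a := by
        have h : ((pre.length : Int) + 1) = ((pre.length + 1 : Nat) : Int) := by push_cast; ring
        rw [h, PySem.List.pyGetD_natCast]
        rw [List.getD_eq_getElem?_getD, List.getElem?_append_right (by omega)]
        simp
      rw [hgp, hga]
      have hre : pre ++ p :: a :: r = (pre ++ [p]) ++ a :: r := by simp
      rw [show ((pre.length : Int) + 1 + 1) = ((pre ++ [p]).length : Int) + 1 by
            push_cast [List.length_append, List.length_cons, List.length_nil]; omega,
          show ((pre.length : Int) + 1 + ((a :: r).length : Int))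
              = ((pre ++ [p]).length : Int) + 1 + (r.length : Int) by
            push_cast [List.length_append, List.length_cons, List.length_nil]; omega,
          hre]
      exact ih (pre ++ [p]) a (pvLazyStep init a p)

theorem pvAdj (p : Int) (t : List Int) (init : Int × Int) :
    (PySem.List.pyRange 1 (((p :: t).length : Nat) : Int) 1).foldl
      (fun st i =>
        if PySem.List.pyGetD (p :: t) i 0 = PySem.List.pyGetD (p :: t) (i - 1) 0 then
          (st.1 + 1, st.2)
        else
          (1, max st.2 st.1)) init
    = pvGoWith pvLazyStep p t init := by
  have h := pvAdjAux t [] p init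
  simp only [List.length_nil, Nat.cast_zero, zero_add, List.nil_append] at h
  rw [show (((p :: t).length : Nat) : Int) = 1 + (t.length : Int) by simp; omega]
  exact h

-- lazy vs eager scan: eager's state is (c, max m c) when lazy's is (c, m)
theorem pvLazyEager (rest : List Int) :
    ∀ (p : Int) (c m : Int), 1 ≤ c → 1 ≤ m →
    pvGoWith pvEagStep p rest (c, max m c) =
      ((pvGoWith pvLazyStep p rest (c, m)).1,
        max (pvGoWith pvLazyStep p rest (c, m)).2 (pvGoWith pvLazyStep p rest (c, m)).1) := by
  induction rest with
  | nil => intro p c m hc hm; simp [pvGoWith, max_comm]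
  | cons a r ih =>
      intro p c m hc hm
      rw [show pvGoWith pvEagStep p (a :: r) (c, max m c)
            = pvGoWith pvEagStep a r (pvEagStep (c, max m c) a p) from rfl,
          show pvGoWith pvLazyStep p (a :: r) (c, m)
            = pvGoWith pvLazyStep a r (pvLazyStep (c, m) a p) from rfl]
      by_cases hap : a = p
      · rw [show pvEagStep (c, max m c) a p = (c + 1, max m (c + 1)) by
            simp only [pvEagStep, if_pos hap]
            rw [show max (max m c) (c + 1) = max m (c + 1) by omega],
          show pvLazyStep (c, m) a p = (c + 1, m) by simp [pvLazyStep, hap]]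
        exact ih a (c + 1) m (by omega) hm
      · rw [show pvEagStep (c, max m c) a p = (1, max m c) by simp [pvEagStep, hap],
          show pvLazyStep (c, m) a p = (1, max m c) by simp [pvLazyStep, hap]]
        have h2 := ih a 1 (max m c) le_rfl (by omega)
        rw [show max (max m c) (1 : Int) = max m c by omega] at h2
        exact h2

theorem pvNajA_eq_eager (p : Int) (t : List Int) :
    pvNajA (p :: t) = (pvGoWith pvEagStep p t (1, 1)).2 := by
  show max ((PySem.List.pyRange 1 (((p :: t).length : Nat) : Int) 1).foldl
      (fun st i =>
        if PySem.List.pyGetD (p :: t) i 0 = PySem.List.pyGetD (p :: t) (i - 1) 0 then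
          (st.1 + 1, st.2)
        else
          (1, max st.2 st.1)) (1, 1)).2 _ = _
  rw [pvAdj p t (1, 1)]
  have h := pvLazyEager t p 1 1 le_rfl le_rfl
  rw [show max (1 : Int) 1 = 1 by omega] at h
  rw [h]

-- eager scan's max component only grows
theorem pvEagerSnd_mono (rest : List Int) :
    ∀ (p : Int) (c m : Int), m ≤ (pvGoWith pvEagStep p rest (c, m)).2 := by
  induction rest with
  | nil => intro p c m; simp [pvGoWith]
  | cons a r ih =>
      intro p c m
      rw [show pvGoWith pvEagStep p (a :: r) (c, m)
            = pvGoWith pvEagStep a r (pvEagStep (c, m) a p) from rfl]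
      unfold pvEagStep
      split
      · exact le_trans (le_max_left m (c + 1)) (ih a (c + 1) (max m (c + 1)))
      · exact ih a 1 m

-- ===== pvFoldF facts =====

theorem pvFoldF_le (l : List (Int × Int)) : ∀ b : Int, b ≤ pvFoldF l b := by
  induction l with
  | nil => intro b; simp [pvFoldF]
  | cons s l ih =>
      intro b
      simp only [pvFoldF, List.foldl_cons]
      exact le_trans (le_max_left b s.2) (ih (max b s.2))

theorem pvFoldF_mem (l : List (Int × Int)) : ∀ (b : Int) (s : Int × Int), s ∈ l → s.2 ≤ pvFoldF l b := by
  induction l with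
  | nil => intro b s h; simp at h
  | cons x l ih =>
      intro b s h
      rcases List.mem_cons.mp h with h | h
      · subst h
        exact le_trans (le_max_right b s.2) (pvFoldF_le l (max b s.2))
      · exact ih (max b x.2) s h

theorem pvFoldF_of_le (l : List (Int × Int)) : ∀ b : Int, (∀ s ∈ l, s.2 ≤ b) → pvFoldF l b = b := by
  induction l with
  | nil => intro b _; rfl
  | cons x l ih =>
      intro b h
      simp only [pvFoldF, List.foldl_cons]
      rw [show max b x.2 = b by have := h x (by simp); omega]
      exact ih b (fun s hs => h s (by simp [hs]))

theorem pvFoldF_max (l : List (Int × Int)) : ∀ b c : Int, pvFoldF l (max b c) = max (pvFoldF l b) c := by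
  induction l with
  | nil => intro b c; rfl
  | cons s l ih =>
      intro b c
      simp only [pvFoldF, List.foldl_cons] at *
      rw [show max (max b c) s.2 = max (max b s.2) c by omega]
      exact ih (max b s.2) c

-- absorbing an intermediate best into a later fold
theorem pvFoldF_absorb (final : List (Int × Int)) (st : List (Int × Int)) :
    ∀ b : Int, (∀ s ∈ st, s.2 ≤ pvFoldF final b) →
    pvFoldF final (pvFoldF st b) = pvFoldF final b := by
  induction st with
  | nil => intro b _; rfl
  | cons x st ih =>
      intro b h
      have hx : x.2 ≤ pvFoldF final b := h x (by simp)
      have hb : pvFoldF final (max b x.2) = pvFoldF final b := by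
        rw [pvFoldF_max final b x.2]; omega
      have hrest : ∀ s ∈ st, s.2 ≤ pvFoldF final (max b x.2) := by
        intro s hs; rw [hb]; exact h s (by simp [hs])
      show pvFoldF final (pvFoldF st (max b x.2)) = pvFoldF final b
      rw [ih (max b x.2) hrest]
      exact hb

-- ===== B inner loop =====

theorem pvInner (st : List (Int × Int)) :
    ∀ (p r : List Int) (b : Int) (acc : List Int), 1 ≤ b → (∀ s ∈ st, s.2 ≤ b) →
    (((st.map Prod.fst).zip p).zip r).foldl
      (fun (acc : List Int × Int) t =>
        let c : Int := if t.2 = t.1.2 then t.1.1 + 1 else 1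
        (acc.1 ++ [c], if c > acc.2 then c else acc.2)) (acc, b)
    = (acc ++ (pvRowStep st p r).map Prod.fst, pvFoldF (pvRowStep st p r) b) := by
  induction st with
  | nil => intro p r b acc hb _; simp [pvRowStep, pvFoldF]
  | cons s st ih =>
      intro p r b acc hb hmem
      cases p with
      | nil => simp [pvRowStep, pvFoldF]
      | cons x ps =>
          cases r with
          | nil => simp [pvRowStep, pvFoldF]
          | cons a as_ =>
              have hs2 : s.2 ≤ b := hmem s (by simp)
              simp only [List.map_cons, List.zip_cons_cons, List.foldl_cons]
              by_cases hax : a = x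
              · show (((st.map Prod.fst).zip ps).zip as_).foldl _
                    (acc ++ [if a = x then s.1 + 1 else 1],
                     if (if a = x then s.1 + 1 else 1) > b then (if a = x then s.1 + 1 else 1) else b) = _
                rw [if_pos hax,
                  show (if s.1 + 1 > b then s.1 + 1 else b) = max b (max s.2 (s.1 + 1)) by omega]
                rw [ih ps as_ (max b (max s.2 (s.1 + 1))) (acc ++ [s.1 + 1]) (by omega)
                  (fun s' hs' => le_trans (hmem s' (by simp [hs'])) (by omega))]
                simp only [pvRowStep, pvEagStep, if_pos hax, List.map_cons, pvFoldF,
                  List.foldl_cons, List.append_assoc, List.singleton_append]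
              · show (((st.map Prod.fst).zip ps).zip as_).foldl _
                    (acc ++ [if a = x then s.1 + 1 else 1],
                     if (if a = x then s.1 + 1 else 1) > b then (if a = x then s.1 + 1 else 1) else b) = _
                rw [if_neg hax,
                  show (if (1 : Int) > b then (1 : Int) else b) = max b s.2 by omega]
                rw [ih ps as_ (max b s.2) (acc ++ [(1 : Int)]) (by omega)
                  (fun s' hs' => le_trans (hmem s' (by simp [hs'])) (by omega))]
                simp only [pvRowStep, pvEagStep, if_neg hax, List.map_cons, pvFoldF,
                  List.foldl_cons, List.append_assoc, List.singleton_append]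

-- ===== B outer loop =====

theorem pvFoldRows_length (n : Nat) (L : List (List Int × List Int)) :
    ∀ st : List (Int × Int), st.length = n →
    (∀ pr ∈ L, n ≤ pr.1.length ∧ n ≤ pr.2.length) → (pvFoldRows L st).length = n := by
  induction L with
  | nil => intro st h _; simpa [pvFoldRows] using h
  | cons pr L ih =>
      intro st h hL
      have hpr := hL pr (by simp)
      show (pvFoldRows L (pvRowStep st pr.1 pr.2)).length = n
      exact ih (pvRowStep st pr.1 pr.2)
        (by rw [pvRowStep_length]; omega)
        (fun q hq => hL q (by simp [hq]))

theorem pvFoldRows_snd_mono (n : Nat) (L : List (List Int × List Int)) :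
    ∀ (st : List (Int × Int)) (k : Nat), st.length = n → k < n →
    (∀ pr ∈ L, n ≤ pr.1.length ∧ n ≤ pr.2.length) →
    (st.getD k (0, 0)).2 ≤ ((pvFoldRows L st).getD k (0, 0)).2 := by
  induction L with
  | nil => intro st k h hk _; simp [pvFoldRows]
  | cons pr L ih =>
      intro st k h hk hL
      have hpr := hL pr (by simp)
      have hlen : (pvRowStep st pr.1 pr.2).length = n := by rw [pvRowStep_length]; omega
      have hstep : (st.getD k (0, 0)).2 ≤ ((pvRowStep st pr.1 pr.2).getD k (0, 0)).2 := by
        rw [pvRowStep_getD st pr.1 pr.2 k (by omega) (by omega) (by omega)]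
        unfold pvEagStep
        split
        · simp only []; omega
        · simp
      exact le_trans hstep
        (ih (pvRowStep st pr.1 pr.2) k hlen hk (fun q hq => hL q (by simp [hq])))

theorem pvOuter (n : Nat) (L : List (List Int × List Int)) :
    ∀ (st : List (Int × Int)) (b : Int), st.length = n →
    (∀ pr ∈ L, n ≤ pr.1.length ∧ n ≤ pr.2.length) → 1 ≤ b → (∀ s ∈ st, s.2 ≤ b) →
    L.foldl
      (fun (st : List Int × Int) pr =>
        ((st.1.zip pr.1).zip pr.2).foldl
          (fun (acc : List Int × Int) t =>
            let c : Int := if t.2 = t.1.2 then t.1.1 + 1 else 1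
            (acc.1 ++ [c], if c > acc.2 then c else acc.2)) (([] : List Int), st.2))
      (st.map Prod.fst, b)
    = ((pvFoldRows L st).map Prod.fst, pvFoldF (pvFoldRows L st) b) := by
  induction L with
  | nil =>
      intro st b _ _ _ hmem
      simp only [List.foldl_nil, pvFoldRows]
      rw [pvFoldF_of_le st b hmem]
  | cons pr L ih =>
      intro st b hlen hL hb hmem
      have hpr := hL pr (by simp)
      simp only [List.foldl_cons]
      rw [pvInner st pr.1 pr.2 b [] hb hmem]
      simp only [List.nil_append]
      have hlen1 : (pvRowStep st pr.1 pr.2).length = n := by rw [pvRowStep_length]; omega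
      have hb1 : 1 ≤ pvFoldF (pvRowStep st pr.1 pr.2) b :=
        le_trans hb (pvFoldF_le (pvRowStep st pr.1 pr.2) b)
      have hmem1 : ∀ s ∈ pvRowStep st pr.1 pr.2, s.2 ≤ pvFoldF (pvRowStep st pr.1 pr.2) b :=
        fun s hs => pvFoldF_mem (pvRowStep st pr.1 pr.2) b s hs
      rw [ih (pvRowStep st pr.1 pr.2) (pvFoldF (pvRowStep st pr.1 pr.2) b) hlen1
        (fun q hq => hL q (by simp [hq])) hb1 hmem1]
      have hLtail : ∀ q ∈ L, n ≤ q.1.length ∧ n ≤ q.2.length := fun q hq => hL q (by simp [hq])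
      have hflen : (pvFoldRows L (pvRowStep st pr.1 pr.2)).length = n :=
        pvFoldRows_length n L (pvRowStep st pr.1 pr.2) hlen1 hLtail
      have habs : pvFoldF (pvFoldRows L (pvRowStep st pr.1 pr.2))
            (pvFoldF (pvRowStep st pr.1 pr.2) b)
          = pvFoldF (pvFoldRows L (pvRowStep st pr.1 pr.2)) b := by
        apply pvFoldF_absorb
        intro s hs
        obtain ⟨k, hk, rfl⟩ := List.mem_iff_getElem.mp hs
        have hkn : k < n := by omega
        have hgd : (pvRowStep st pr.1 pr.2).getD k (0, 0) = (pvRowStep st pr.1 pr.2)[k] :=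
          List.getD_eq_getElem _ (0, 0) (by omega)
        have h1 : ((pvRowStep st pr.1 pr.2).getD k (0, 0)).2
            ≤ ((pvFoldRows L (pvRowStep st pr.1 pr.2)).getD k (0, 0)).2 :=
          pvFoldRows_snd_mono n L (pvRowStep st pr.1 pr.2) k hlen1 hkn hLtail
        have h2 : (pvFoldRows L (pvRowStep st pr.1 pr.2)).getD k (0, 0)
            ∈ pvFoldRows L (pvRowStep st pr.1 pr.2) := by
          rw [List.getD_eq_getElem _ (0, 0) (by omega)]
          exact List.getElem_mem _
        calc ((pvRowStep st pr.1 pr.2)[k]).2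
            = ((pvRowStep st pr.1 pr.2).getD k (0, 0)).2 := by rw [hgd]
          _ ≤ ((pvFoldRows L (pvRowStep st pr.1 pr.2)).getD k (0, 0)).2 := h1
          _ ≤ _ := pvFoldF_mem _ b _ h2
      rw [habs]
      show _ = ((pvFoldRows (pr :: L) st).map Prod.fst, pvFoldF (pvFoldRows (pr :: L) st) b)
      rfl

-- ===== column characterisation =====

theorem pvCols (rest : List (List Int)) :
    ∀ (prevRow : List Int) (st : List (Int × Int)) (k : Nat),
    k < st.length → k < prevRow.length → (∀ r ∈ rest, k < r.length) →
    (pvFoldRows ((prevRow :: rest).zip rest) st).getD k (0, 0)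
      = pvGoWith pvEagStep (prevRow.getD k 0) (rest.map (fun r => r.getD k 0)) (st.getD k (0, 0)) := by
  induction rest with
  | nil => intro prevRow st k h1 h2 h3; simp [pvFoldRows, pvGoWith]
  | cons r1 rs ih =>
      intro prevRow st k h1 h2 h3
      have hr1 : k < r1.length := h3 r1 (by simp)
      show (pvFoldRows ((r1 :: rs).zip rs) (pvRowStep st prevRow r1)).getD k (0, 0) = _
      rw [ih r1 (pvRowStep st prevRow r1) k
        (by rw [pvRowStep_length]; omega) hr1 (fun r hr => h3 r (by simp [hr]))]
      rw [pvRowStep_getD st prevRow r1 k h1 h2 hr1]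
      rfl

-- reconstructing a list as a map over range
theorem pvSelfMap (l : List (Int × Int)) (d : Int × Int) :
    (List.range l.length).map (fun k => l.getD k d) = l := by
  apply List.ext_getElem
  · simp
  · intro k h1 h2
    simp [List.getElem?_eq_getElem h2]

theorem pvReplFold (m : Nat) : (List.replicate m (1 : Int)).foldl max 1 = 1 := by
  induction m with
  | zero => rfl
  | succ m ih => simpa [List.replicate_succ] using ih

-- column j of the image, and its run maximum
def pvColRun (r0 : List Int) (rest : List (List Int)) (k : Nat) : Int :=
  (pvGoWith pvEagStep (r0.getD k 0) (rest.map (fun r => r.getD k 0)) (1, 1)).2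

-- A's value in closed form
theorem pvColList (obraz : List (List Int)) (j : Int) :
    (PySem.List.pyRange 0 (obraz.length : Int) 1).map
      (fun i => PySem.List.pyGetD (PySem.List.pyGetD obraz i ([] : List Int)) j 0)
      = obraz.map (fun r => PySem.List.pyGetD r j 0) := by
  conv_rhs => rw [← PySem.List.map_pyGetD_pyRange_zero obraz ([] : List Int)]
  rw [List.map_map]
  rfl

theorem pvOne_le_colRun (r0 : List Int) (rest : List (List Int)) (k : Nat) :
    1 ≤ pvColRun r0 rest k := by
  unfold pvColRun
  exact pvEagerSnd_mono _ _ 1 1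

theorem pvA_eq (r0 : List Int) (rest : List (List Int)) (hr0 : r0 ≠ []) :
    zadanie_4 (r0 :: rest)
      = ((List.range r0.length).map (pvColRun r0 rest)).foldl max 1 := by
  have hvals : (PySem.List.pyRange 0 ((PySem.List.pyGetD (r0 :: rest) 0 ([] : List Int)).length : Int) 1).map
      (fun j => pvNajA ((PySem.List.pyRange 0 (((r0 :: rest).length : Nat) : Int) 1).map
        (fun i => PySem.List.pyGetD (PySem.List.pyGetD (r0 :: rest) i ([] : List Int)) j 0)))
      = (List.range r0.length).map (pvColRun r0 rest) := by
    rw [PySem.List.pyGetD_zero_cons, PySem.List.pyRange_zero_natCast r0.length, List.map_map]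
    apply List.map_congr_left
    intro k _
    show pvNajA ((PySem.List.pyRange 0 (((r0 :: rest).length : Nat) : Int) 1).map
      (fun i => PySem.List.pyGetD (PySem.List.pyGetD (r0 :: rest) i ([] : List Int)) (k : Int) 0))
      = pvColRun r0 rest k
    rw [pvColList (r0 :: rest) (k : Int)]
    simp only [List.map_cons, PySem.List.pyGetD_natCast]
    rw [pvNajA_eq_eager]
    rfl
  have hb : zadanie_4 (r0 :: rest)
      = (match (List.range r0.length).map (pvColRun r0 rest) with
          | [] => (0 : Int)
          | h :: t => t.foldl max h) := by
    show (match (PySem.List.pyRange 0 ((PySem.List.pyGetD (r0 :: rest) 0 ([] : List Int)).length : Int) 1).map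
        (fun j => pvNajA ((PySem.List.pyRange 0 (((r0 :: rest).length : Nat) : Int) 1).map
          (fun i => PySem.List.pyGetD (PySem.List.pyGetD (r0 :: rest) i ([] : List Int)) j 0))) with
        | [] => (0 : Int)
        | h :: t => t.foldl max h) = _
    rw [hvals]
  rw [hb]
  obtain ⟨m, hm⟩ : ∃ m, r0.length = m + 1 := by
    cases r0 with
    | nil => exact absurd rfl hr0
    | cons x xs => exact ⟨xs.length, rfl⟩
  rw [hm, List.range_succ_eq_map, List.map_cons]
  show ((List.map Nat.succ (List.range m)).map (pvColRun r0 rest)).foldl max (pvColRun r0 rest 0) = _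
  rw [List.foldl_cons, show max 1 (pvColRun r0 rest 0) = pvColRun r0 rest 0 by
    have := pvOne_le_colRun r0 rest 0; omega]

-- B's value in closed form
theorem pvFoldlCongr {α β : Type} (l : List α) (f g : β → α → β) (init : β)
    (h : ∀ acc, ∀ x ∈ l, f acc x = g acc x) : l.foldl f init = l.foldl g init := by
  induction l generalizing init with
  | nil => rfl
  | cons a l ih =>
      simp only [List.foldl_cons]
      rw [h init a (by simp)]
      exact ih (g init a) (fun acc x hx => h acc x (by simp [hx]))

theorem pvB_core (r0 : List Int) (rest : List (List Int)) (m : Nat) (hm : r0.length = m + 1)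
    (hrows : ∀ r ∈ r0 :: rest, r0.length ≤ r.length) :
    (((r0 :: rest).zip rest).foldl
      (fun (st : List Int × Int) pr =>
        ((st.1.zip pr.1).zip pr.2).foldl
          (fun (acc : List Int × Int) t =>
            let c : Int := if t.2 = t.1.2 then t.1.1 + 1 else 1
            (acc.1 ++ [c], if c > acc.2 then c else acc.2)) (([] : List Int), st.2))
      ((1 : Int) :: List.replicate m (1 : Int), (List.replicate m (1 : Int)).foldl max 1)).2
    = ((List.range (m + 1)).map (pvColRun r0 rest)).foldl max 1 := by
  have hL : ∀ pr ∈ (r0 :: rest).zip rest, m + 1 ≤ pr.1.length ∧ m + 1 ≤ pr.2.length := by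
    intro pr hpr
    obtain ⟨a, b⟩ := pr
    obtain ⟨ha, hb⟩ := List.of_mem_zip hpr
    exact ⟨hm ▸ hrows a ha, hm ▸ hrows b (by simp [hb])⟩
  rw [pvReplFold m,
    show (1 : Int) :: List.replicate m (1 : Int)
        = (List.replicate (m + 1) ((1 : Int), (1 : Int))).map Prod.fst by
      simp [List.map_replicate, List.replicate_succ]]
  rw [pvOuter (m + 1) ((r0 :: rest).zip rest) (List.replicate (m + 1) ((1 : Int), (1 : Int))) 1
    (by simp) hL le_rfl
    (fun s hs => by rw [List.eq_of_mem_replicate hs]) ]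
  show pvFoldF (pvFoldRows ((r0 :: rest).zip rest) (List.replicate (m + 1) ((1 : Int), (1 : Int)))) 1 = _
  have hFlen : (pvFoldRows ((r0 :: rest).zip rest) (List.replicate (m + 1) ((1 : Int), (1 : Int)))).length
      = m + 1 :=
    pvFoldRows_length (m + 1) _ _ (by simp) hL
  have hFk : ∀ k, k < m + 1 →
      (pvFoldRows ((r0 :: rest).zip rest) (List.replicate (m + 1) ((1 : Int), (1 : Int)))).getD k (0, 0)
        = pvGoWith pvEagStep (r0.getD k 0) (rest.map (fun r => r.getD k 0)) (1, 1) := by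
    intro k hk
    rw [pvCols rest r0 (List.replicate (m + 1) ((1 : Int), (1 : Int))) k
      (by simp; omega) (by omega) (fun r hr => by have := hrows r (by simp [hr]); omega)]
    congr 1
    rw [List.getD_eq_getElem _ _ (by simp; omega)]
    simp
  have hFmap : pvFoldRows ((r0 :: rest).zip rest) (List.replicate (m + 1) ((1 : Int), (1 : Int)))
      = (List.range (m + 1)).map
          (fun k => (pvFoldRows ((r0 :: rest).zip rest)
            (List.replicate (m + 1) ((1 : Int), (1 : Int)))).getD k (0, 0)) := by
    conv_lhs => rw [← pvSelfMap (pvFoldRows ((r0 :: rest).zip rest)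
      (List.replicate (m + 1) ((1 : Int), (1 : Int)))) (0, 0)]
    rw [hFlen]
  conv_lhs => rw [hFmap]
  unfold pvFoldF
  rw [List.foldl_map, List.foldl_map]
  apply pvFoldlCongr
  intro acc k hk
  rw [hFk k (List.mem_range.mp hk)]
  rfl

theorem pvB_eq (r0 : List Int) (rest : List (List Int)) (hr0 : r0 ≠ [])
    (hrows : ∀ r ∈ r0 :: rest, r0.length ≤ r.length) :
    zadanie_4_alt (r0 :: rest)
      = ((List.range r0.length).map (pvColRun r0 rest)).foldl max 1 := by
  obtain ⟨m, hm⟩ : ∃ m, r0.length = m + 1 := by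
    cases r0 with
    | nil => exact absurd rfl hr0
    | cons x xs => exact ⟨xs.length, rfl⟩
  have hn : (PySem.List.pyGetD (r0 :: rest) 0 ([] : List Int)).length = m + 1 := by
    rw [PySem.List.pyGetD_zero_cons]; exact hm
  unfold zadanie_4_alt
  rw [hn, List.replicate_succ, hm]
  exact pvB_core r0 rest m hm hrows

-- ===== VERDICT (by name: the statement is the Claim_ definition above) =====
theorem zadanie_4_spec : Claim_equal_zadanie_4 := by
  intro obraz _ hpre
  obtain ⟨hne, hhead, hrows⟩ := hpre
  obtain ⟨r0, rest, rfl⟩ := List.exists_cons_of_ne_nil hne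
  simp only [List.headI] at hhead hrows
  show zadanie_4 (r0 :: rest) = zadanie_4_alt (r0 :: rest)
  rw [pvA_eq r0 rest hhead, pvB_eq r0 rest hhead hrows]
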